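-- pv_equiv track=rewrite | github.com/AtomHammer/DemonDice | Lucky.py | extract_increasing_path
-- ===== SOURCE A (Python) =====
-- def extract_increasing_path(rolls):
--     """
--     Given a list of total_rolls, return only the increasing path,
--     plus the final roll (even if it's a drop).
--     """
--     filtered_turns = [1]
--     filtered_rolls = [rolls[0]]
--
--     for i in range(1, len(rolls)):
--         if rolls[i] > filtered_rolls[-1]:
--             filtered_turns.append(i + 1)
--             filtered_rolls.append(rolls[i])
--
--     if filtered_turns[-1] != len(rolls):
--         filtered_turns.append(len(rolls))
--         filtered_rolls.append(rolls[-1])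
--
--     return filtered_turns, filtered_rolls
-- ===== SOURCE B (Python) =====
-- def extract_increasing_path(rolls):
--     """
--     Given a list of total_rolls, return only the increasing path,
--     plus the final roll (even if it's a drop).
--     """
--     first = rolls[0]
--     # Pass 1: explicit prefix-maximum (record) table over rolls.
--     prefix = []
--     m = first
--     for x in rolls:
--         m = m if m >= x else x
--         prefix.append(m)
--     # Pass 2: an index i (i >= 1) is a new record iff rolls[i] beats prefix[i-1].
--     keep = [i for i in range(1, len(rolls)) if rolls[i] > prefix[i - 1]]
--     turns = [1] + [i + 1 for i in keep]
--     vals = [first] + [rolls[i] for i in keep]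
--     if turns[-1] != len(rolls):
--         turns.append(len(rolls))
--         vals.append(rolls[-1])
--     return turns, vals
-- ===== Notes on version B (the rewrite author's own statement) =====
-- stated objective: alternative
-- what changed: B replaces A's single loop that threads the running record through the tail of the growing kept list with two passes: it first materialises an explicit prefix-maximum table, then selects record indices by comparing each roll against the table, building turns and values by comprehension.
import Mathlib
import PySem

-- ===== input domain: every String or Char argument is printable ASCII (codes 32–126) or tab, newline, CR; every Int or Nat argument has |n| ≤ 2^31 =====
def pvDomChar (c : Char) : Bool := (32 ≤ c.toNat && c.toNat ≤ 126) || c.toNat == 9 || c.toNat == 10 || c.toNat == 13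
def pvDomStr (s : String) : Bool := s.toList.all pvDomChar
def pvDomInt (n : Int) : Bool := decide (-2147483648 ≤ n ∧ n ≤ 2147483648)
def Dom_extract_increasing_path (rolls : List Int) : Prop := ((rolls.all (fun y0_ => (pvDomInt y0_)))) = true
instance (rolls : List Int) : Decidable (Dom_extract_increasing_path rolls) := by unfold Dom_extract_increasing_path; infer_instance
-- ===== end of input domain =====

-- B replaces A's single loop (which threads the running record through the tail of the growing
-- kept list) with two passes: an explicit prefix-maximum table, then a filter against that table
-- (objective: alternative decomposition, same cost). Equivalence of the RETURN values is proved
-- on Pre_ (nonempty input; Python raises IndexError on []).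

-- ===== PORT A =====
-- indexing via pyGet?; Pre_ guarantees every index read is in range, so .getD 0 is never taken
def aStep (rolls : List Int) (st : List Int × List Int) (i : Int) : List Int × List Int :=
  if (PySem.List.pyGet? rolls i).getD 0 > (PySem.List.pyGet? st.2 (-1)).getD 0 then
    (st.1 ++ [i + 1], st.2 ++ [(PySem.List.pyGet? rolls i).getD 0])
  else st

def extract_increasing_path (rolls : List Int) : List Int × List Int :=
  let filtered_turns : List Int := [1]
  let filtered_rolls : List Int := [(PySem.List.pyGet? rolls 0).getD 0]
  let st := (PySem.List.pyRange 1 (rolls.length : Int) 1).foldl (aStep rolls) (filtered_turns, filtered_rolls)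
  if (PySem.List.pyGet? st.1 (-1)).getD 0 ≠ (rolls.length : Int) then
    (st.1 ++ [(rolls.length : Int)], st.2 ++ [(PySem.List.pyGet? rolls (-1)).getD 0])
  else st

-- ===== PORT B =====
def bPrefixStep (acc : List Int × Int) (x : Int) : List Int × Int :=
  let m := if acc.2 ≥ x then acc.2 else x
  (acc.1 ++ [m], m)

def extract_increasing_path_alt (rolls : List Int) : List Int × List Int :=
  let first := (PySem.List.pyGet? rolls 0).getD 0
  let pfx := (rolls.foldl bPrefixStep ([], first)).1
  let keep := (PySem.List.pyRange 1 (rolls.length : Int) 1).filter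
      (fun i => (PySem.List.pyGet? rolls i).getD 0 > (PySem.List.pyGet? pfx (i - 1)).getD 0)
  let turns := [1] ++ keep.map (fun i => i + 1)
  let vals := [first] ++ keep.map (fun i => (PySem.List.pyGet? rolls i).getD 0)
  if (PySem.List.pyGet? turns (-1)).getD 0 ≠ (rolls.length : Int) then
    (turns ++ [(rolls.length : Int)], vals ++ [(PySem.List.pyGet? rolls (-1)).getD 0])
  else (turns, vals)

-- ===== PRECONDITION & SPEC =====
-- Python A indexes the first element up front and raises IndexError on the empty list; Pre_ excludes exactly that (B raises there too).
def Pre_extract_increasing_path (rolls : List Int) : Prop := rolls ≠ []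
instance (rolls : List Int) : Decidable (Pre_extract_increasing_path rolls) := by unfold Pre_extract_increasing_path; infer_instance
def pvWitness_extract_increasing_path : List Int := [3, 1, 4, 1, 5]

def Spec_extract_increasing_path (rolls : List Int) (out : List Int × List Int) : Prop := out = extract_increasing_path_alt rolls
instance (rolls : List Int) (out : List Int × List Int) : Decidable (Spec_extract_increasing_path rolls out) := by unfold Spec_extract_increasing_path; infer_instance

-- ===== CLAIM (what is proved, stated in full; the proofs are below) =====
def Claim_equal_extract_increasing_path : Prop := ∀ (rolls : List Int), Dom_extract_increasing_path rolls → Pre_extract_increasing_path rolls → Spec_extract_increasing_path rolls (extract_increasing_path rolls)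

-- ===== LEMMAS AND PROOFS =====

-- running max (Python's `m if m >= x else x`)
def rmax (a x : Int) : Int := if a ≥ x then a else x

-- common recursive specification of the loop body: from running max m, next turn number t
def core (m : Int) (t : Int) : List Int → List Int × List Int
  | [] => ([], [])
  | x :: xs =>
    if x > m then ((t :: (core x (t + 1) xs).1), x :: (core x (t + 1) xs).2)
    else core m (t + 1) xs

-- prefix-max scan of B, as a structural function
def scanMax (m : Int) : List Int → List Int
  | [] => []
  | x :: xs => rmax m x :: scanMax (rmax m x) xs

def pmaxUpto (m : Int) (xs : List Int) (k : Nat) : Int := (xs.take k).foldl rmax m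

lemma scanMax_length (m : Int) (xs : List Int) : (scanMax m xs).length = xs.length := by
  induction xs generalizing m with
  | nil => rfl
  | cons x xs ih => simp [scanMax, ih]

lemma scanMax_getElem (xs : List Int) (m : Int) (k : Nat) (hk : k < xs.length) :
    (scanMax m xs)[k]'(by rw [scanMax_length]; exact hk) = pmaxUpto m xs (k + 1) := by
  induction xs generalizing m k with
  | nil => simp at hk
  | cons x xs ih =>
    cases k with
    | zero => simp [scanMax, pmaxUpto]
    | succ k =>
      simp only [scanMax, List.getElem_cons_succ]
      rw [ih (rmax m x) k (by simpa using hk)]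
      simp [pmaxUpto, List.take_succ_cons]

lemma pmaxUpto_succ (m : Int) (xs : List Int) (k : Nat) (hk : k < xs.length) :
    pmaxUpto m xs (k + 1) = rmax (pmaxUpto m xs k) (xs[k]'hk) := by
  unfold pmaxUpto
  have h : List.take (k + 1) xs = List.take k xs ++ [xs[k]'hk] := by
    rw [List.take_add_one, List.getElem?_eq_getElem hk]
    simp
  rw [h, List.foldl_append]
  simp

lemma foldl_bPrefixStep_fst (xs : List Int) :
    ∀ (acc : List Int) (m : Int), (xs.foldl bPrefixStep (acc, m)).1 = acc ++ scanMax m xs := by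
  induction xs with
  | nil => simp [scanMax]
  | cons x xs ih =>
    intro acc m
    simp only [List.foldl_cons, bPrefixStep, scanMax]
    rw [show (if m ≥ x then m else x) = rmax m x from rfl, ih]
    simp

lemma A_fold (rolls : List Int) :
    ∀ (k i : Nat) (pt pv : List Int) (m : Int), i + k = rolls.length →
      pv.getLast? = some m →
      (PySem.List.pyRange (i : Int) (rolls.length : Int) 1).foldl (aStep rolls) (pt, pv)
        = (pt ++ (core m ((i : Int) + 1) (rolls.drop i)).1,
           pv ++ (core m ((i : Int) + 1) (rolls.drop i)).2) := by
  intro k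
  induction k with
  | zero =>
    intro i pt pv m hik _
    rw [PySem.List.pyRange_one_eq_nil (by omega)]
    have hd : rolls.drop i = [] := List.drop_eq_nil_of_le (by omega)
    rw [hd]
    simp [core]
  | succ k ih =>
    intro i pt pv m hik hlast
    have hi : i < rolls.length := by omega
    have hget : (PySem.List.pyGet? rolls (i : Int)).getD 0 = rolls[i] := by
      rw [PySem.List.pyGet?_natCast]; simp [List.getElem?_eq_getElem hi]
    have hlast' : (PySem.List.pyGet? pv (-1)).getD 0 = m := by
      rw [PySem.List.pyGet?_neg_one, hlast]; rfl
    have hdrop : rolls.drop i = rolls[i] :: rolls.drop (i + 1) :=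
      List.drop_eq_getElem_cons hi
    rw [PySem.List.pyRange_one_cons (by exact_mod_cast (by omega : (i : Int) < (rolls.length : Int)))]
    rw [List.foldl_cons]
    by_cases hc : rolls[i] > m
    · have hstep : aStep rolls (pt, pv) (i : Int) = (pt ++ [(i : Int) + 1], pv ++ [rolls[i]]) := by
        simp only [aStep, hget, hlast']
        rw [if_pos hc]
      have ih' := ih (i + 1) (pt ++ [(i : Int) + 1]) (pv ++ [rolls[i]]) rolls[i] (by omega) (by simp)
      push_cast at ih'
      rw [hstep, ih', hdrop]
      simp only [core, if_pos hc]
      simp [List.append_assoc]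
    · have hstep : aStep rolls (pt, pv) (i : Int) = (pt, pv) := by
        simp only [aStep, hget, hlast']
        rw [if_neg hc]
      have ih' := ih (i + 1) pt pv m (by omega) hlast
      push_cast at ih'
      rw [hstep, ih', hdrop]
      simp only [core, if_neg hc]

lemma B_fold (rolls : List Int) (r0 : Int) :
    ∀ (k i : Nat), 1 ≤ i → i + k = rolls.length →
      (((PySem.List.pyRange (i : Int) (rolls.length : Int) 1).filter
          (fun j => (PySem.List.pyGet? rolls j).getD 0 > (PySem.List.pyGet? (scanMax r0 rolls) (j - 1)).getD 0)).map
            (fun j => j + 1)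
          = (core (pmaxUpto r0 rolls i) ((i : Int) + 1) (rolls.drop i)).1)
      ∧ (((PySem.List.pyRange (i : Int) (rolls.length : Int) 1).filter
          (fun j => (PySem.List.pyGet? rolls j).getD 0 > (PySem.List.pyGet? (scanMax r0 rolls) (j - 1)).getD 0)).map
            (fun j => (PySem.List.pyGet? rolls j).getD 0)
          = (core (pmaxUpto r0 rolls i) ((i : Int) + 1) (rolls.drop i)).2) := by
  intro k
  induction k with
  | zero =>
    intro i h1 hik
    rw [PySem.List.pyRange_one_eq_nil (by omega)]
    have hd : rolls.drop i = [] := List.drop_eq_nil_of_le (by omega)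
    rw [hd]
    simp [core]
  | succ k ih =>
    intro i h1 hik
    have hi : i < rolls.length := by omega
    have e1 : (PySem.List.pyGet? rolls (i : Int)).getD 0 = rolls[i] := by
      rw [PySem.List.pyGet?_natCast]; simp [List.getElem?_eq_getElem hi]
    have e2 : (PySem.List.pyGet? (scanMax r0 rolls) ((i : Int) - 1)).getD 0 = pmaxUpto r0 rolls i := by
      have hcast : (i : Int) - 1 = ((i - 1 : Nat) : Int) := by omega
      have hlt : i - 1 < (scanMax r0 rolls).length := by rw [scanMax_length]; omega
      rw [hcast, PySem.List.pyGet?_natCast]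
      rw [List.getElem?_eq_getElem hlt]
      simp only [Option.getD_some]
      rw [scanMax_getElem rolls r0 (i - 1) (by omega)]
      congr 1
      omega
    have hdrop : rolls.drop i = rolls[i] :: rolls.drop (i + 1) :=
      List.drop_eq_getElem_cons hi
    rw [PySem.List.pyRange_one_cons (by exact_mod_cast (by omega : (i : Int) < (rolls.length : Int)))]
    rw [List.filter_cons]
    by_cases hc : rolls[i] > pmaxUpto r0 rolls i
    · rw [if_pos (by simp only [e1, e2, decide_eq_true_eq]; exact hc)]
      have hpm : pmaxUpto r0 rolls (i + 1) = rolls[i] := by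
        rw [pmaxUpto_succ r0 rolls i hi]
        simp [rmax, not_le.mpr hc]
      obtain ⟨ih1, ih2⟩ := ih (i + 1) (by omega) (by omega)
      rw [hpm] at ih1 ih2
      push_cast at ih1 ih2
      rw [hdrop]
      simp only [core, if_pos hc, List.map_cons]
      exact ⟨by rw [ih1], by rw [e1, ih2]⟩
    · rw [if_neg (by simp only [e1, e2, decide_eq_true_eq]; exact hc)]
      have hpm : pmaxUpto r0 rolls (i + 1) = pmaxUpto r0 rolls i := by
        rw [pmaxUpto_succ r0 rolls i hi]
        simp [rmax, le_of_not_gt hc]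
      obtain ⟨ih1, ih2⟩ := ih (i + 1) (by omega) (by omega)
      rw [hpm] at ih1 ih2
      push_cast at ih1 ih2
      rw [hdrop]
      simp only [core, if_neg hc]
      exact ⟨ih1, ih2⟩

-- ===== VERDICT (by name: the statement is the Claim_ definition above) =====
theorem extract_increasing_path_spec : Claim_equal_extract_increasing_path := by
  intro rolls _ hpre
  unfold Spec_extract_increasing_path
  obtain ⟨x, xs, rfl⟩ := List.exists_cons_of_ne_nil hpre
  have hA := A_fold (x :: xs) ((x :: xs).length - 1) 1 [1] [x] x (by simp only [List.length_cons]; omega) (by simp)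
  push_cast at hA
  have hB := B_fold (x :: xs) x ((x :: xs).length - 1) 1 (by omega) (by simp only [List.length_cons]; omega)
  have hpm1 : pmaxUpto x (x :: xs) 1 = x := by simp [pmaxUpto, rmax]
  rw [hpm1] at hB
  push_cast at hB
  obtain ⟨hB1, hB2⟩ := hB
  rw [extract_increasing_path, extract_increasing_path_alt]
  simp only [PySem.List.pyGet?_zero_cons, Option.getD_some]
  rw [foldl_bPrefixStep_fst]
  rw [List.nil_append, hA, hB1, hB2]
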